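-- pv_equiv track=rewrite | github.com/gongohsamgong/AlgorithmStudy | BJ/2563.py | solution
-- ===== SOURCE A (Python) =====
-- def solution(paper_location):
--     total = 0
--     array = [[0] * 100 for _ in range(100)]
--     for loc in paper_location:
--         for i in range(loc[1], loc[1] + 10):
--             for j in range(loc[0], loc[0] + 10):
--                 array[i][j] = 1
--     for k in range(100):
--         total += array[k].count(1)
--     return total
-- ===== SOURCE B (Python) =====
-- def solution(paper_location):
--     # Group each paper's column spans by the board rows it occupies (row index
--     # semantics are Python's: negative origins wrap), then take the interval
--     # union of each row's spans with one sorted sweep.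
--     rows = [[] for _ in range(100)]
--     for x, y in paper_location:
--         lo = x % 100
--         if lo <= 90:
--             pieces = [(lo, lo + 10)]
--         else:
--             pieces = [(0, lo - 90), (lo, 100)]
--         for i in range(y, y + 10):
--             rows[i] += pieces
--     total = 0
--     for spans in rows:
--         spans.sort(key=lambda s: s[0])
--         end = 0
--         for lo, hi in spans:
--             if hi > end:
--                 total += hi - max(lo, end)
--                 end = hi
--     return total
-- ===== Notes on version B (the rewrite author's own statement) =====
-- stated objective: alternative
-- what changed: B never materialises the 100x100 grid: it reduces each paper's column origin modulo 100 (Python's list-index wraparound, stated explicitly) into one or two column spans per covered row, sorts the spans of each row by start, and sweeps them once, adding the length of each new piece of the interval union; Pre_ excludes only the inputs on which A raises IndexError (a coordinate outside [-100, 90]).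
import Mathlib
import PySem

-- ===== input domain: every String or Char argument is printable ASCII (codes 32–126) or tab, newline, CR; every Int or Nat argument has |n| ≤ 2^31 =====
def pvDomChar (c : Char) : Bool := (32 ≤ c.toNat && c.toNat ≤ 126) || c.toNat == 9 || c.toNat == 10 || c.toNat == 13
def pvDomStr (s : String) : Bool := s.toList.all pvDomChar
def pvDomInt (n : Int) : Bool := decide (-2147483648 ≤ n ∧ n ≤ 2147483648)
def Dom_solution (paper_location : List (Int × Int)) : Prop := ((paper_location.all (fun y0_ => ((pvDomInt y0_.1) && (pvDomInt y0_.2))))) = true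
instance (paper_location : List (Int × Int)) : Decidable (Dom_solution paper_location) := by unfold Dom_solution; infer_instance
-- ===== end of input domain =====

set_option maxRecDepth 4000

-- B replaces A's rasterisation (stamp every cell of every paper into a 100x100 grid, then count
-- the 1s row by row) by a per-row interval-union sweep: each paper contributes one or two column
-- spans (origin reduced modulo 100) to each board row it occupies, and each row's spans are
-- sorted by start and scanned once. Alternative algorithm, not claimed faster.

-- ===== PORT A =====
-- array[i][j] = 1 is ported as: fetch row array[i], set its j-th entry, store the row back
-- (PySem pyGetD/pySetD carry Python's negative-index semantics; out-of-range = IndexError is outside Pre_).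
def solution (paper_location : List (Int × Int)) : Int :=
  let array : List (List Int) :=
    (PySem.List.pyRange 0 100 1).map (fun _ => PySem.List.pyRepeat [(0 : Int)] 100)
  let array := paper_location.foldl (fun array loc =>
    (PySem.List.pyRange loc.2 (loc.2 + 10) 1).foldl (fun array i =>
      (PySem.List.pyRange loc.1 (loc.1 + 10) 1).foldl (fun array j =>
        PySem.List.pySetD array i (PySem.List.pySetD (PySem.List.pyGetD array i []) j 1)) array) array) array
  (PySem.List.pyRange 0 100 1).foldl (fun total k =>
    total + (PySem.List.count (PySem.List.pyGetD array k []) 1 : Int)) 0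

-- ===== PORT B =====
-- the one or two column spans [lo, hi) a paper with origin x occupies ('lo = x % 100'; Python % = fmod)
def colSpans (x : Int) : List (Int × Int) :=
  let lo := PySem.Int.mod x 100
  if lo ≤ 90 then [(lo, lo + 10)] else [(0, lo - 90), (lo, 100)]

-- 'rows[i] += pieces' is ported as: fetch rows[i], append, store back
-- (PySem pyGetD/pySetD carry Python's negative-index semantics; out-of-range = IndexError is outside Pre_).
def solution_alt (paper_location : List (Int × Int)) : Int :=
  let rows : List (List (Int × Int)) := (PySem.List.pyRange 0 100 1).map (fun _ => [])
  let rows := paper_location.foldl (fun rows p =>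
    (PySem.List.pyRange p.2 (p.2 + 10) 1).foldl (fun rows i =>
      PySem.List.pySetD rows i (PySem.List.pyGetD rows i [] ++ colSpans p.1)) rows) rows
  rows.foldl (fun total spans =>
    ((PySem.List.sorted spans (fun q => q.1) false).foldl
      (fun s q => if q.2 > s.2 then (s.1 + (q.2 - max q.1 s.2), q.2) else s)
      (total, 0)).1) 0

-- ===== PRECONDITION & SPEC =====
-- Pre_ excludes exactly the inputs on which A raises IndexError: a coordinate outside [-100, 90]
-- drives some list index of the 100-cell axis out of Python's valid range.
def Pre_solution (paper_location : List (Int × Int)) : Prop :=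
  ∀ p ∈ paper_location, -100 ≤ p.1 ∧ p.1 ≤ 90 ∧ -100 ≤ p.2 ∧ p.2 ≤ 90
instance (paper_location : List (Int × Int)) : Decidable (Pre_solution paper_location) := by
  unfold Pre_solution; infer_instance
def pvWitness_solution : (List (Int × Int)) := [(3, 5)]

def Spec_solution (paper_location : List (Int × Int)) (out : Int) : Prop :=
  out = solution_alt paper_location
instance (paper_location : List (Int × Int)) (out : Int) : Decidable (Spec_solution paper_location out) := by
  unfold Spec_solution; infer_instance

-- ===== CLAIM (what is proved, stated in full; the proofs are below) =====
def Claim_equal_solution : Prop := ∀ (paper_location : List (Int × Int)), Dom_solution paper_location → Pre_solution paper_location → Spec_solution paper_location (solution paper_location)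

-- ===== LEMMAS AND PROOFS =====

-- ----- A side: the stamped grid is the indicator of a coverage predicate -----

-- the index Python actually writes to for index i ∈ [-100, 100) of a 100-element list
def wrapIdx (i : Int) : Int := if i < 0 then i + 100 else i

-- the cell test induced by A's stamping: some paper's index ranges hit row a / column b
def coverA (l : List (Int × Int)) (a b : Int) : Bool :=
  l.any (fun p =>
    ((PySem.List.pyRange p.2 (p.2 + 10) 1).any (fun i => a == wrapIdx i)) &&
    ((PySem.List.pyRange p.1 (p.1 + 10) 1).any (fun j => b == wrapIdx j)))

-- a 100×100 grid whose cell (i, j) is 1 exactly when f i j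
def gridOf (f : Int → Int → Bool) : List (List Int) :=
  (List.range 100).map (fun i : Nat =>
    (List.range 100).map (fun j : Nat => if f (i : Int) (j : Int) then 1 else 0))

lemma gridOf_congr (f g : Int → Int → Bool)
    (h : ∀ a b : Nat, a < 100 → b < 100 → f a b = g a b) : gridOf f = gridOf g := by
  apply List.ext_getElem (by simp [gridOf])
  intro a h1 h2
  simp only [gridOf, List.length_map, List.length_range] at h1
  simp only [gridOf, List.getElem_map, List.getElem_range]
  apply List.ext_getElem (by simp)
  intro b h3 h4
  simp only [List.length_map, List.length_range] at h3
  simp only [List.getElem_map, List.getElem_range]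
  rw [h a b h1 h3]

lemma set_map_range {α : Type} (n k : Nat) (g : Nat → α) (v : α) :
    ((List.range n).map g).set k v = (List.range n).map (fun a => if a = k then v else g a) := by
  apply List.ext_getElem (by simp)
  intro m h1 h2
  simp only [List.getElem_set, List.getElem_map, List.getElem_range]
  by_cases h : k = m
  · simp [h]
  · simp [h, Ne.symm h]

lemma beq_int_decide (x y : Int) : (x == y) = decide (x = y) := by
  by_cases h : x = y <;> simp [h]

lemma pySetD_idx {α : Type} (xs : List α) (i : Int) (v : α)
    (hlen : xs.length = 100) (h0 : -100 ≤ i) (h1 : i < 100) :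
    PySem.List.pySetD xs i v = xs.set (wrapIdx i).toNat v := by
  unfold wrapIdx
  by_cases h : i < 0
  · rw [if_pos h]
    simp only [PySem.List.pySetD, PySem.List.pySet?, PySem.List.pyIdx?, hlen]
    rw [if_neg (show ¬ (0 : Int) ≤ i by omega), if_pos (show -((100 : Nat) : Int) ≤ i by omega)]
    simp only [Option.map_some, Option.getD_some]
    congr 1
    omega
  · rw [if_neg h, PySem.List.pySetD_of_nonneg _ _ (by omega)]

lemma pyGetD_idx {α : Type} (xs : List α) (i : Int) (d : α)
    (hlen : xs.length = 100) (h0 : -100 ≤ i) (h1 : i < 100) :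
    PySem.List.pyGetD xs i d = xs.getD (wrapIdx i).toNat d := by
  by_cases h : i < 0
  · have hk : i = -(((-i).toNat : Nat) : Int) := by omega
    rw [hk, PySem.List.pyGetD_neg_natCast xs (-i).toNat d (by omega) (by omega)]
    rw [List.getD_eq_getElem _ _ (by simp [wrapIdx]; omega)]
    congr 1
    simp only [wrapIdx]
    rw [if_pos (by omega : -(((-i).toNat : Nat) : Int) < 0)]
    omega
  · rw [PySem.List.pyGetD_eq_getElem _ _ (by omega) (by omega)]
    rw [List.getD_eq_getElem _ _ (by simp [wrapIdx]; omega)]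
    congr 1
    simp only [wrapIdx, if_neg h]

lemma setCell_gridOf (f : Int → Int → Bool) (i j : Int)
    (hi0 : -100 ≤ i) (hi1 : i < 100) (hj0 : -100 ≤ j) (hj1 : j < 100) :
    PySem.List.pySetD (gridOf f) i (PySem.List.pySetD (PySem.List.pyGetD (gridOf f) i []) j 1)
      = gridOf (fun a b => f a b || (a == wrapIdx i && b == wrapIdx j)) := by
  have hwi : 0 ≤ wrapIdx i ∧ wrapIdx i < 100 := by unfold wrapIdx; split_ifs <;> omega
  have hwj : 0 ≤ wrapIdx j ∧ wrapIdx j < 100 := by unfold wrapIdx; split_ifs <;> omega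
  have hni : ((wrapIdx i).toNat : Int) = wrapIdx i := by omega
  have hnj : ((wrapIdx j).toNat : Int) = wrapIdx j := by omega
  have hrow : PySem.List.pyGetD (gridOf f) i []
      = (List.range 100).map (fun b : Nat => if f ((wrapIdx i).toNat : Int) (b : Int) then (1 : Int) else 0) := by
    rw [pyGetD_idx _ _ _ (by simp [gridOf]) hi0 hi1]
    unfold gridOf
    rw [List.getD_eq_getElem _ _ (by simp; omega), List.getElem_map, List.getElem_range]
  rw [hrow, pySetD_idx _ _ _ (by simp) hj0 hj1, pySetD_idx _ _ _ (by simp [gridOf]) hi0 hi1]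
  unfold gridOf
  rw [set_map_range, set_map_range]
  refine List.map_congr_left (fun a ha => ?_)
  by_cases hai : a = (wrapIdx i).toNat
  · subst hai
    rw [if_pos rfl]
    refine List.map_congr_left (fun b hb => ?_)
    have h2 : (((wrapIdx i).toNat : Int) == wrapIdx i) = true := by rw [beq_int_decide]; simp [hni]
    by_cases hbj : b = (wrapIdx j).toNat
    · subst hbj
      have h3 : (((wrapIdx j).toNat : Int) == wrapIdx j) = true := by rw [beq_int_decide]; simp [hnj]
      rw [if_pos rfl]
      simp only [h2, h3]
      simp
    · have h3 : ((b : Int) == wrapIdx j) = false := by rw [beq_int_decide]; simp; omega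
      rw [if_neg hbj]
      simp only [h2, h3]
      simp
  · have h1 : ((a : Int) == wrapIdx i) = false := by rw [beq_int_decide]; simp; omega
    rw [if_neg hai]
    simp only [h1]
    simp

lemma foldl_cols (L : List Int) (f : Int → Int → Bool) (i : Int)
    (hi0 : -100 ≤ i) (hi1 : i < 100) (hL : ∀ j ∈ L, -100 ≤ j ∧ j < 100) :
    L.foldl (fun g j => PySem.List.pySetD g i (PySem.List.pySetD (PySem.List.pyGetD g i []) j 1)) (gridOf f)
      = gridOf (fun a b => f a b || (a == wrapIdx i && L.any (fun j => b == wrapIdx j))) := by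
  induction L generalizing f with
  | nil => simp [List.foldl]
  | cons j L ih =>
    obtain ⟨hj0, hj1⟩ := hL j (by simp)
    rw [List.foldl_cons, setCell_gridOf f i j hi0 hi1 hj0 hj1,
        ih _ (fun x hx => hL x (by simp [hx]))]
    apply gridOf_congr
    intro a b _ _
    simp [List.any_cons, Bool.and_or_distrib_left, Bool.or_assoc]

lemma foldl_rows (Li Lj : List Int) (f : Int → Int → Bool)
    (hLi : ∀ i ∈ Li, -100 ≤ i ∧ i < 100) (hLj : ∀ j ∈ Lj, -100 ≤ j ∧ j < 100) :
    Li.foldl (fun g i => Lj.foldl (fun g j =>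
        PySem.List.pySetD g i (PySem.List.pySetD (PySem.List.pyGetD g i []) j 1)) g) (gridOf f)
      = gridOf (fun a b => f a b ||
          (Li.any (fun i => a == wrapIdx i) && Lj.any (fun j => b == wrapIdx j))) := by
  induction Li generalizing f with
  | nil => simp [List.foldl]
  | cons i Li ih =>
    obtain ⟨hi0, hi1⟩ := hLi i (by simp)
    rw [List.foldl_cons, foldl_cols Lj f i hi0 hi1 hLj,
        ih _ (fun x hx => hLi x (by simp [hx]))]
    apply gridOf_congr
    intro a b _ _
    simp [List.any_cons, Bool.and_or_distrib_right, Bool.or_assoc]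

lemma foldl_papers (l : List (Int × Int)) (f : Int → Int → Bool)
    (hl : ∀ p ∈ l, -100 ≤ p.1 ∧ p.1 ≤ 90 ∧ -100 ≤ p.2 ∧ p.2 ≤ 90) :
    l.foldl (fun g loc =>
        (PySem.List.pyRange loc.2 (loc.2 + 10) 1).foldl (fun g i =>
          (PySem.List.pyRange loc.1 (loc.1 + 10) 1).foldl (fun g j =>
            PySem.List.pySetD g i (PySem.List.pySetD (PySem.List.pyGetD g i []) j 1)) g) g) (gridOf f)
      = gridOf (fun a b => f a b || coverA l a b) := by
  induction l generalizing f with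
  | nil => simp [List.foldl, coverA]
  | cons p l ih =>
    obtain ⟨hx0, hx1, hy0, hy1⟩ := hl p (by simp)
    have hri : ∀ i ∈ PySem.List.pyRange p.2 (p.2 + 10) 1, -100 ≤ i ∧ i < 100 := by
      intro i hi; rw [PySem.List.mem_pyRange_one] at hi; omega
    have hrj : ∀ j ∈ PySem.List.pyRange p.1 (p.1 + 10) 1, -100 ≤ j ∧ j < 100 := by
      intro j hj; rw [PySem.List.mem_pyRange_one] at hj; omega
    rw [List.foldl_cons, foldl_rows _ _ f hri hrj, ih _ (fun x hx => hl x (by simp [hx]))]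
    apply gridOf_congr
    intro a b _ _
    simp [coverA, List.any_cons, Bool.or_assoc]

lemma count_one_row (L : List Nat) (p : Nat → Bool) :
    List.count (1 : Int) (L.map (fun b => if p b then (1 : Int) else 0)) = L.countP p := by
  induction L with
  | nil => rfl
  | cons b L ih =>
    by_cases h : p b <;> simp [h, ih]

lemma init_grid :
    ((PySem.List.pyRange 0 100 1).map (fun _ => PySem.List.pyRepeat [(0 : Int)] 100))
      = gridOf (fun _ _ => false) := by
  decide

lemma solution_eq_countP (l : List (Int × Int))
    (hl : ∀ p ∈ l, -100 ≤ p.1 ∧ p.1 ≤ 90 ∧ -100 ≤ p.2 ∧ p.2 ≤ 90) :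
    solution l = ((List.range 100).map
      (fun a : Nat => ((List.range 100).countP (fun b : Nat => coverA l (a : Int) (b : Int)) : Int))).sum := by
  dsimp only [solution]
  rw [init_grid, foldl_papers l _ hl]
  have hg : gridOf (fun a b => false || coverA l a b) = gridOf (fun a b => coverA l a b) := by
    apply gridOf_congr; intro a b _ _; simp
  rw [hg]
  rw [PySem.List.pyRange_one]
  simp only [List.foldl_map, zero_add]
  rw [PySem.List.foldl_add (g := fun k : Nat =>
    (PySem.List.count (PySem.List.pyGetD (gridOf (fun a b => coverA l a b)) ((k : Nat) : Int) []) 1 : Int))]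
  rw [zero_add]
  congr 1
  refine List.map_congr_left (fun a ha => ?_)
  have ha' : a < 100 := List.mem_range.mp ha
  rw [PySem.List.count_eq]
  have hrow : PySem.List.pyGetD (gridOf (fun a b => coverA l a b)) ((a : Nat) : Int) []
      = (List.range 100).map (fun b : Nat => if coverA l (a : Int) (b : Int) then (1 : Int) else 0) := by
    rw [PySem.List.pyGetD_natCast]
    unfold gridOf
    rw [List.getD_eq_getElem?_getD, List.getElem?_map, List.getElem?_range ha']
    rfl
  rw [hrow, count_one_row]

-- ----- bridging Python's wrapped indices to modular arithmetic -----

lemma pymod_eq (a : Int) : PySem.Int.mod a 100 = a % 100 := by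
  show a.fmod 100 = a % 100
  rw [Int.fmod_eq_emod_of_nonneg]
  omega

lemma wrapIdx_emod (i : Int) (h0 : -100 ≤ i) (h1 : i < 100) : wrapIdx i = i % 100 := by
  unfold wrapIdx
  split_ifs <;> omega

-- does the paper at y cover this row (the row indices of range(y, y+10) wrap modulo 100)
def coversRow (row y : Int) : Bool := PySem.Int.mod (row - y) 100 < 10

-- ----- B side: spans and the interval-union sweep -----

-- Σ over b < n of the indicator [lo ≤ b < hi] is the interval length hi - lo
lemma ind_sum (lo : Int) (n : Nat) : ∀ hi : Int, 0 ≤ lo → lo ≤ hi → hi ≤ (n : Int) →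
    ((List.range n).map (fun b : Nat => if lo ≤ (b : Int) ∧ (b : Int) < hi then (1 : Int) else 0)).sum
      = hi - lo := by
  induction n with
  | zero => intro hi h0 h1 h2; simp at h2 ⊢; omega
  | succ n ih =>
    intro hi h0 h1 h2
    rw [List.range_succ, List.map_append, List.sum_append]
    by_cases hh : hi ≤ (n : Int)
    · rw [ih hi h0 h1 hh]
      simp only [List.map_cons, List.map_nil, List.sum_cons, List.sum_nil]
      rw [if_neg (by omega)]
      omega
    · by_cases hlo : lo ≤ (n : Int)
      · have hpre : ((List.range n).map (fun b : Nat => if lo ≤ (b : Int) ∧ (b : Int) < hi then (1 : Int) else 0))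
            = (List.range n).map (fun b : Nat => if lo ≤ (b : Int) ∧ (b : Int) < (n : Int) then (1 : Int) else 0) := by
          refine List.map_congr_left (fun b hb => ?_)
          have hb' : b < n := List.mem_range.mp hb
          by_cases hc : lo ≤ (b : Int)
          · rw [if_pos ⟨hc, by omega⟩, if_pos ⟨hc, by exact_mod_cast Nat.cast_lt.mpr hb'⟩]
          · rw [if_neg (by tauto), if_neg (by tauto)]
        rw [hpre, ih (n : Int) h0 hlo le_rfl]
        simp only [List.map_cons, List.map_nil, List.sum_cons, List.sum_nil]
        rw [if_pos ⟨hlo, by omega⟩]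
        omega
      · have hle : hi = lo := by omega
        have hpre : ((List.range n).map (fun b : Nat => if lo ≤ (b : Int) ∧ (b : Int) < hi then (1 : Int) else 0))
            = (List.range n).map (fun _ => (0 : Int)) := by
          refine List.map_congr_left (fun b hb => ?_)
          have hb' : b < n := List.mem_range.mp hb
          rw [if_neg (by omega)]
        rw [hpre]
        simp only [List.map_cons, List.map_nil, List.sum_cons, List.sum_nil]
        rw [if_neg (by omega)]
        simp
        omega

-- the sweep invariant: from state (t, e) over a list of spans sorted by start, the fold's total
-- gains exactly the number of cells b ∈ [0, 100) with e ≤ b lying inside some span [lo, hi)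
lemma sweep (qs : List (Int × Int)) (hs : qs.Pairwise (fun q q' => q.1 ≤ q'.1))
    (hb : ∀ q ∈ qs, 0 ≤ q.1 ∧ q.1 ≤ q.2 ∧ q.2 ≤ 100) :
    ∀ t e : Int, 0 ≤ e →
    (qs.foldl (fun s q => if q.2 > s.2 then (s.1 + (q.2 - max q.1 s.2), q.2) else s) (t, e)).1
      = t + ((List.range 100).map (fun b : Nat =>
          if e ≤ (b : Int) ∧ qs.any (fun q => decide (q.1 ≤ (b : Int) ∧ (b : Int) < q.2))
          then (1 : Int) else 0)).sum := by
  induction qs with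
  | nil =>
    intro t e he
    simp
  | cons q qs ih =>
    intro t e he
    obtain ⟨hq0, hq1, hq2⟩ := hb q (by simp)
    have hqle : ∀ y ∈ qs, q.1 ≤ y.1 := fun y hy => (List.pairwise_cons.mp hs).1 y hy
    have hs' := (List.pairwise_cons.mp hs).2
    have hb' : ∀ y ∈ qs, 0 ≤ y.1 ∧ y.1 ≤ y.2 ∧ y.2 ≤ 100 := fun y hy => hb y (by simp [hy])
    rw [List.foldl_cons]
    by_cases hc : q.2 > e
    · rw [if_pos hc]
      rw [ih hs' hb' (t + (q.2 - max q.1 e)) q.2 (by omega)]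
      have hsplit : ((List.range 100).map (fun b : Nat =>
            if e ≤ (b : Int) ∧ (q :: qs).any (fun y => decide (y.1 ≤ (b : Int) ∧ (b : Int) < y.2))
            then (1 : Int) else 0))
          = (List.range 100).map (fun b : Nat =>
              (if max q.1 e ≤ (b : Int) ∧ (b : Int) < q.2 then (1 : Int) else 0)
              + (if q.2 ≤ (b : Int) ∧ qs.any (fun y => decide (y.1 ≤ (b : Int) ∧ (b : Int) < y.2))
                 then (1 : Int) else 0)) := by
        refine List.map_congr_left (fun b hbm => ?_)
        have hb100 : b < 100 := List.mem_range.mp hbm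
        simp only [List.any_cons, Bool.or_eq_true, decide_eq_true_eq]
        by_cases hA : (qs.any fun y => decide (y.1 ≤ (b : Int) ∧ (b : Int) < y.2)) = true
        · obtain ⟨y, hyx, hyb1, hyb2⟩ : ∃ y : Int × Int, q.1 ≤ y.1 ∧ y.1 ≤ (b : Int) ∧ (b : Int) < y.2 := by
            rw [List.any_eq_true] at hA
            obtain ⟨y, hy, hyc⟩ := hA
            rw [decide_eq_true_eq] at hyc
            exact ⟨y, hqle y hy, hyc.1, hyc.2⟩
          simp only [hA, or_true, and_true]
          split_ifs <;> omega
        · simp only [eq_false hA, or_false, and_false, if_false]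
          split_ifs <;> omega
      rw [hsplit, PySem.List.sum_map_add_int,
          ind_sum (max q.1 e) 100 q.2 (by omega) (by omega) (by omega)]
      ring
    · rw [if_neg hc]
      rw [ih hs' hb' t e he]
      congr 2
      refine List.map_congr_left (fun b hbm => ?_)
      simp only [List.any_cons, Bool.or_eq_true, decide_eq_true_eq]
      by_cases hA : (qs.any fun y => decide (y.1 ≤ (b : Int) ∧ (b : Int) < y.2)) = true
      · simp only [hA, or_true, and_true]
      · simp only [eq_false hA, or_false, and_false, if_false]
        split_ifs <;> omega

-- the spans B collects for a row (the list its inner loops walk before sorting)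
def rowSpans (l : List (Int × Int)) (row : Int) : List (Int × Int) :=
  l.foldl (fun spans p => if coversRow row p.2 then spans ++ colSpans p.1 else spans) []

lemma mem_rowSpans_aux (row : Int) (l : List (Int × Int)) :
    ∀ (acc : List (Int × Int)) (q : Int × Int),
    (q ∈ l.foldl (fun spans p => if coversRow row p.2 then spans ++ colSpans p.1 else spans) acc)
      ↔ (q ∈ acc ∨ ∃ p ∈ l, coversRow row p.2 = true ∧ q ∈ colSpans p.1) := by
  induction l with
  | nil => intro acc q; simp
  | cons p l ih =>
    intro acc q
    rw [List.foldl_cons]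
    by_cases h : coversRow row p.2 = true
    · rw [if_pos h, ih]
      rw [List.mem_append]
      constructor
      · rintro ((hq | hq) | ⟨p', hp', hc, hq⟩)
        · exact Or.inl hq
        · exact Or.inr ⟨p, by simp, h, hq⟩
        · exact Or.inr ⟨p', by simp [hp'], hc, hq⟩
      · rintro (hq | ⟨p', hp', hc, hq⟩)
        · exact Or.inl (Or.inl hq)
        · rcases List.mem_cons.mp hp' with h' | h'
          · exact Or.inl (Or.inr (h' ▸ hq))
          · exact Or.inr ⟨p', h', hc, hq⟩
    · rw [if_neg h, ih]
      constructor
      · rintro (hq | ⟨p', hp', hc, hq⟩)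
        · exact Or.inl hq
        · exact Or.inr ⟨p', by simp [hp'], hc, hq⟩
      · rintro (hq | ⟨p', hp', hc, hq⟩)
        · exact Or.inl hq
        · rcases List.mem_cons.mp hp' with h' | h'
          · exact absurd (h' ▸ hc) h
          · exact Or.inr ⟨p', h', hc, hq⟩

lemma mem_rowSpans (l : List (Int × Int)) (row : Int) (q : Int × Int) :
    q ∈ rowSpans l row ↔ ∃ p ∈ l, coversRow row p.2 = true ∧ q ∈ colSpans p.1 := by
  unfold rowSpans
  rw [mem_rowSpans_aux]
  simp

lemma colSpans_bounds (x : Int) : ∀ q ∈ colSpans x, 0 ≤ q.1 ∧ q.1 ≤ q.2 ∧ q.2 ≤ 100 := by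
  intro q hq
  unfold colSpans at hq
  simp only [pymod_eq] at hq
  by_cases h : x % 100 ≤ 90
  · rw [if_pos h, List.mem_singleton] at hq
    subst hq
    refine ⟨?_, ?_, ?_⟩ <;> (try simp) <;> (try omega)
  · rw [if_neg h] at hq
    rcases List.mem_cons.mp hq with rfl | hq'
    · refine ⟨?_, ?_, ?_⟩ <;> (try simp) <;> (try omega)
    · rw [List.mem_singleton] at hq'
      subst hq'
      refine ⟨?_, ?_, ?_⟩ <;> (try simp) <;> (try omega)

lemma rowSpans_bounds (l : List (Int × Int)) (row : Int) :
    ∀ q ∈ rowSpans l row, 0 ≤ q.1 ∧ q.1 ≤ q.2 ∧ q.2 ≤ 100 := by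
  intro q hq
  obtain ⟨p, _, _, hq'⟩ := (mem_rowSpans l row q).mp hq
  exact colSpans_bounds p.1 q hq'

-- '(row - y) % 100 < 10' says exactly: some index i of range(y, y+10) wraps onto this row
lemma coversRow_iff (row y : Int) (hr : 0 ≤ row ∧ row < 100) (_hy : -100 ≤ y ∧ y ≤ 90) :
    coversRow row y = true ↔ ∃ i, y ≤ i ∧ i < y + 10 ∧ row = i % 100 := by
  unfold coversRow
  rw [pymod_eq, decide_eq_true_eq]
  constructor
  · intro h
    exact ⟨y + (row - y) % 100, by omega, by omega, by omega⟩
  · rintro ⟨i, h1, h2, h3⟩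
    omega

-- the span pieces of a paper at x cover exactly the wrapped images of range(x, x+10)
lemma colSpans_iff (x b : Int) (hx : -100 ≤ x ∧ x ≤ 90) (hb : 0 ≤ b ∧ b < 100) :
    (∃ q ∈ colSpans x, q.1 ≤ b ∧ b < q.2) ↔ ∃ j, x ≤ j ∧ j < x + 10 ∧ b = j % 100 := by
  unfold colSpans
  simp only [pymod_eq]
  by_cases hlo : x % 100 ≤ 90
  · rw [if_pos hlo]
    simp only [List.mem_singleton]
    constructor
    · rintro ⟨q, rfl, h1, h2⟩
      exact ⟨x + (b - x % 100), by omega, by omega, by omega⟩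
    · rintro ⟨j, h1, h2, h3⟩
      exact ⟨(x % 100, x % 100 + 10), rfl, by omega, by omega⟩
  · rw [if_neg hlo]
    constructor
    · rintro ⟨q, hq, h1, h2⟩
      rcases List.mem_cons.mp hq with rfl | hq'
      · exact ⟨b, by omega, by omega, by omega⟩
      · rw [List.mem_singleton] at hq'
        subst hq'
        exact ⟨b - 100, by omega, by omega, by omega⟩
    · rintro ⟨j, h1, h2, h3⟩
      by_cases hj : j < 0
      · exact ⟨(x % 100, 100), by simp, by omega, by omega⟩
      · exact ⟨(0, x % 100 - 90), by simp, by omega, by omega⟩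

-- ----- B phase 1: the per-row grouping loop builds exactly rowSpans -----

-- a 100-entry row table whose entry r is g r
def rowsOf (g : Nat → List (Int × Int)) : List (List (Int × Int)) := (List.range 100).map g

lemma rowsOf_congr (g h : Nat → List (Int × Int)) (he : ∀ r : Nat, r < 100 → g r = h r) :
    rowsOf g = rowsOf h := by
  unfold rowsOf
  exact List.map_congr_left (fun r hr => he r (List.mem_range.mp hr))

lemma setRow (g : Nat → List (Int × Int)) (i : Int) (pieces : List (Int × Int))
    (hi0 : -100 ≤ i) (hi1 : i < 100) :
    PySem.List.pySetD (rowsOf g) i (PySem.List.pyGetD (rowsOf g) i [] ++ pieces)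
      = rowsOf (fun r => if (r : Int) == wrapIdx i then g r ++ pieces else g r) := by
  have hw : 0 ≤ wrapIdx i ∧ wrapIdx i < 100 := by unfold wrapIdx; split_ifs <;> omega
  have hni : ((wrapIdx i).toNat : Int) = wrapIdx i := by omega
  have hrow : PySem.List.pyGetD (rowsOf g) i [] = g (wrapIdx i).toNat := by
    rw [pyGetD_idx _ _ _ (by simp [rowsOf]) hi0 hi1]
    unfold rowsOf
    rw [List.getD_eq_getElem _ _ (by simp; omega), List.getElem_map, List.getElem_range]
  rw [hrow, pySetD_idx _ _ _ (by simp [rowsOf]) hi0 hi1]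
  unfold rowsOf
  rw [set_map_range]
  refine List.map_congr_left (fun a ha => ?_)
  by_cases hai : a = (wrapIdx i).toNat
  · subst hai
    have hc : (((((wrapIdx i).toNat : Nat)) : Int) == wrapIdx i) = true := by
      rw [beq_int_decide]; simp [hni]
    rw [if_pos rfl, if_pos hc]
  · have hc : ((a : Int) == wrapIdx i) = false := by rw [beq_int_decide]; simp; omega
    have hc' : ¬(((a : Int) == wrapIdx i) = true) := by rw [hc]; exact Bool.false_ne_true
    rw [if_neg hai, if_neg hc']

lemma window_aux (L : List Int) (pieces : List (Int × Int))
    (hLb : ∀ i ∈ L, -100 ≤ i ∧ i < 100)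
    (hLd : L.Pairwise (fun i i' => wrapIdx i ≠ wrapIdx i')) :
    ∀ g : Nat → List (Int × Int),
    L.foldl (fun rows i => PySem.List.pySetD rows i (PySem.List.pyGetD rows i [] ++ pieces)) (rowsOf g)
      = rowsOf (fun r => if L.any (fun i => (r : Int) == wrapIdx i) then g r ++ pieces else g r) := by
  induction L with
  | nil =>
    intro g
    simp only [List.foldl_nil, List.any_nil]
    exact (rowsOf_congr _ _ (fun r _ => by simp)).symm
  | cons i L ih =>
    intro g
    obtain ⟨hi0, hi1⟩ := hLb i (by simp)
    rw [List.foldl_cons, setRow g i pieces hi0 hi1,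
        ih (fun x hx => hLb x (by simp [hx])) (List.pairwise_cons.mp hLd).2]
    refine rowsOf_congr _ _ (fun r hr => ?_)
    simp only [List.any_cons]
    by_cases hhead : ((r : Int) == wrapIdx i) = true
    · have hLfalse : (L.any (fun i' => (r : Int) == wrapIdx i')) = false := by
        rw [List.any_eq_false]
        intro i' hi'
        rw [beq_int_decide, decide_eq_true_eq] at hhead ⊢
        intro hcon
        exact (List.pairwise_cons.mp hLd).1 i' hi' (by omega)
      simp [hLfalse, hhead]
    · have hh : ((r : Int) == wrapIdx i) = false := by simpa using hhead
      simp [hh]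

lemma window_wrap_pairwise (y : Int) :
    (PySem.List.pyRange y (y + 10) 1).Pairwise (fun i i' => wrapIdx i ≠ wrapIdx i') := by
  have hlt := PySem.List.pairwise_lt_pyRange_one (a := y) (b := y + 10)
  refine List.Pairwise.imp_of_mem ?_ hlt
  intro i i' hi hi' hlt'
  rw [PySem.List.mem_pyRange_one] at hi hi'
  unfold wrapIdx
  split_ifs <;> omega

-- after the first phase, row r of the table holds exactly the row's span list rowSpans
lemma rowSpans_pull (l : List (Int × Int)) (row : Int) :
    ∀ a : List (Int × Int),
    l.foldl (fun spans p => if coversRow row p.2 then spans ++ colSpans p.1 else spans) a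
      = a ++ l.foldl (fun spans p => if coversRow row p.2 then spans ++ colSpans p.1 else spans) [] := by
  induction l with
  | nil => intro a; simp
  | cons p l ih =>
    intro a
    rw [List.foldl_cons, List.foldl_cons]
    by_cases h : coversRow row p.2 = true
    · rw [if_pos h, if_pos h, ih (a ++ colSpans p.1), ih ([] ++ colSpans p.1)]
      simp [List.append_assoc]
    · rw [if_neg h, if_neg h, ih a]

lemma papers_foldl_rows (l : List (Int × Int))
    (hl : ∀ p ∈ l, -100 ≤ p.2 ∧ p.2 ≤ 90) :
    ∀ g : Nat → List (Int × Int),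
    l.foldl (fun rows p =>
        (PySem.List.pyRange p.2 (p.2 + 10) 1).foldl (fun rows i =>
          PySem.List.pySetD rows i (PySem.List.pyGetD rows i [] ++ colSpans p.1)) rows) (rowsOf g)
      = rowsOf (fun r => g r ++ rowSpans l (r : Int)) := by
  induction l with
  | nil =>
    intro g
    simp only [List.foldl_nil]
    exact (rowsOf_congr _ _ (fun r _ => by simp [rowSpans])).symm
  | cons p l ih =>
    intro g
    obtain ⟨hy0, hy1⟩ := hl p (by simp)
    have hwb : ∀ i ∈ PySem.List.pyRange p.2 (p.2 + 10) 1, -100 ≤ i ∧ i < 100 := by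
      intro i hi; rw [PySem.List.mem_pyRange_one] at hi; omega
    rw [List.foldl_cons,
        window_aux (PySem.List.pyRange p.2 (p.2 + 10) 1) (colSpans p.1) hwb
          (window_wrap_pairwise p.2) g,
        ih (fun x hx => hl x (by simp [hx]))]
    refine rowsOf_congr _ _ (fun r hr => ?_)
    have hany : ((PySem.List.pyRange p.2 (p.2 + 10) 1).any (fun i => (r : Int) == wrapIdx i))
        = coversRow (r : Int) p.2 := by
      rw [Bool.eq_iff_iff, List.any_eq_true,
          coversRow_iff (r : Int) p.2 ⟨Int.natCast_nonneg r, by exact_mod_cast hr⟩ ⟨hy0, hy1⟩]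
      constructor
      · rintro ⟨i, hi, he⟩
        rw [PySem.List.mem_pyRange_one] at hi
        rw [beq_int_decide, decide_eq_true_eq, wrapIdx_emod i (by omega) (by omega)] at he
        exact ⟨i, by omega, by omega, he⟩
      · rintro ⟨i, h1, h2, h3⟩
        refine ⟨i, PySem.List.mem_pyRange_one.mpr ⟨h1, h2⟩, ?_⟩
        rw [beq_int_decide, decide_eq_true_eq, wrapIdx_emod i (by omega) (by omega)]
        exact h3
    have hspan : rowSpans (p :: l) (r : Int)
        = (if coversRow (r : Int) p.2 then colSpans p.1 else []) ++ rowSpans l (r : Int) := by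
      unfold rowSpans
      rw [List.foldl_cons, rowSpans_pull]
      by_cases h : coversRow (r : Int) p.2 = true
      · rw [if_pos h, if_pos h, List.nil_append]
      · rw [if_neg h, if_neg h, List.nil_append]
    rw [hspan, hany]
    by_cases h : coversRow (r : Int) p.2 = true
    · rw [if_pos h, if_pos h, List.append_assoc]
    · rw [if_neg h, if_neg h, List.nil_append]

lemma init_rows :
    ((PySem.List.pyRange 0 100 1).map (fun _ => ([] : List (Int × Int))))
      = rowsOf (fun _ => []) := by
  decide

-- a cell is stamped by A iff it lies in one of B's spans for its row
lemma cover_iff (l : List (Int × Int))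
    (hl : ∀ p ∈ l, -100 ≤ p.1 ∧ p.1 ≤ 90 ∧ -100 ≤ p.2 ∧ p.2 ≤ 90)
    (a b : Int) (ha : 0 ≤ a ∧ a < 100) (hb : 0 ≤ b ∧ b < 100) :
    coverA l a b = true ↔ ∃ q ∈ rowSpans l a, q.1 ≤ b ∧ b < q.2 := by
  unfold coverA
  rw [List.any_eq_true]
  constructor
  · rintro ⟨p, hp, hc⟩
    obtain ⟨hx0, hx1, hy0, hy1⟩ := hl p hp
    rw [Bool.and_eq_true, List.any_eq_true, List.any_eq_true] at hc
    obtain ⟨⟨i, hi, hei⟩, ⟨j, hj, hej⟩⟩ := hc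
    rw [PySem.List.mem_pyRange_one] at hi hj
    rw [beq_int_decide, decide_eq_true_eq] at hei hej
    rw [wrapIdx_emod i (by omega) (by omega)] at hei
    rw [wrapIdx_emod j (by omega) (by omega)] at hej
    obtain ⟨q, hq, hq1, hq2⟩ := (colSpans_iff p.1 b ⟨hx0, hx1⟩ hb).mpr ⟨j, by omega, by omega, hej⟩
    refine ⟨q, (mem_rowSpans l a q).mpr ⟨p, hp, ?_, hq⟩, hq1, hq2⟩
    exact (coversRow_iff a p.2 ha ⟨hy0, hy1⟩).mpr ⟨i, by omega, by omega, hei⟩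
  · rintro ⟨q, hq, hq1, hq2⟩
    obtain ⟨p, hp, hcr, hqc⟩ := (mem_rowSpans l a q).mp hq
    obtain ⟨hx0, hx1, hy0, hy1⟩ := hl p hp
    obtain ⟨i, hi1, hi2, hi3⟩ := (coversRow_iff a p.2 ha ⟨hy0, hy1⟩).mp hcr
    obtain ⟨j, hj1, hj2, hj3⟩ := (colSpans_iff p.1 b ⟨hx0, hx1⟩ hb).mp ⟨q, hqc, hq1, hq2⟩
    refine ⟨p, hp, ?_⟩
    rw [Bool.and_eq_true, List.any_eq_true, List.any_eq_true]
    refine ⟨⟨i, PySem.List.mem_pyRange_one.mpr ⟨hi1, hi2⟩, ?_⟩,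
            ⟨j, PySem.List.mem_pyRange_one.mpr ⟨hj1, hj2⟩, ?_⟩⟩
    · rw [beq_int_decide, decide_eq_true_eq, wrapIdx_emod i (by omega) (by omega)]
      exact hi3
    · rw [beq_int_decide, decide_eq_true_eq, wrapIdx_emod j (by omega) (by omega)]
      exact hj3

-- per row, the inner sweep adds the row's covered-cell count
lemma row_total (l : List (Int × Int))
    (hl : ∀ p ∈ l, -100 ≤ p.1 ∧ p.1 ≤ 90 ∧ -100 ≤ p.2 ∧ p.2 ≤ 90)
    (row : Int) (ha : 0 ≤ row ∧ row < 100) (t : Int) :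
    ((PySem.List.sorted (rowSpans l row) (fun q => q.1) false).foldl
        (fun s q => if q.2 > s.2 then (s.1 + (q.2 - max q.1 s.2), q.2) else s) (t, 0)).1
      = t + ((List.range 100).countP (fun b : Nat => coverA l row (b : Int)) : Int) := by
  have hsorted : (PySem.List.sorted (rowSpans l row) (fun q => q.1) false).Pairwise
      (fun q q' => q.1 ≤ q'.1) := PySem.List.sorted_pairwise (rowSpans l row) (fun q => q.1)
  have hbnd : ∀ q ∈ PySem.List.sorted (rowSpans l row) (fun q => q.1) false,
      0 ≤ q.1 ∧ q.1 ≤ q.2 ∧ q.2 ≤ 100 := by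
    intro q hq
    exact rowSpans_bounds l row q ((PySem.List.mem_sorted _ _ _ q).mp hq)
  rw [sweep _ hsorted hbnd t 0 le_rfl]
  congr 1
  have hpt : ((List.range 100).map (fun b : Nat =>
        if (0 : Int) ≤ (b : Int) ∧ (PySem.List.sorted (rowSpans l row) (fun q => q.1) false).any
            (fun q => decide (q.1 ≤ (b : Int) ∧ (b : Int) < q.2))
        then (1 : Int) else 0))
      = (List.range 100).map (fun b : Nat =>
          if coverA l row (b : Int) = true then (1 : Int) else 0) := by
    refine List.map_congr_left (fun b hbm => ?_)
    have hb100 : b < 100 := List.mem_range.mp hbm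
    have hany : (PySem.List.sorted (rowSpans l row) (fun q => q.1) false).any
          (fun q => decide (q.1 ≤ (b : Int) ∧ (b : Int) < q.2)) = true
        ↔ coverA l row (b : Int) = true := by
      rw [List.any_eq_true]
      rw [cover_iff l hl row (b : Int) ha ⟨Int.natCast_nonneg b, by exact_mod_cast hb100⟩]
      constructor
      · rintro ⟨q, hq, hc⟩
        rw [decide_eq_true_eq] at hc
        exact ⟨q, (PySem.List.mem_sorted _ _ _ q).mp hq, hc⟩
      · rintro ⟨q, hq, hc⟩
        exact ⟨q, (PySem.List.mem_sorted _ _ _ q).mpr hq, by rw [decide_eq_true_eq]; exact hc⟩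
    by_cases h : coverA l row (b : Int) = true
    · rw [if_pos ⟨Int.natCast_nonneg b, hany.mpr h⟩, if_pos h]
    · rw [if_neg (fun hh => h (hany.mp hh.2)), if_neg h]
  rw [hpt, PySem.List.sum_map_ite_one_zero]

-- ===== VERDICT (by name: the statement is the Claim_ definition above) =====
theorem solution_spec : Claim_equal_solution := by
  intro l _ hpre
  unfold Spec_solution
  rw [solution_eq_countP l hpre]
  show _ = ((( (PySem.List.pyRange 0 100 1).map (fun _ => ([] : List (Int × Int)))) |> (fun rows =>
    l.foldl (fun rows p =>
      (PySem.List.pyRange p.2 (p.2 + 10) 1).foldl (fun rows i =>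
        PySem.List.pySetD rows i (PySem.List.pyGetD rows i [] ++ colSpans p.1)) rows) rows)) |> (fun rows =>
    rows.foldl (fun total spans =>
      ((PySem.List.sorted spans (fun q => q.1) false).foldl
        (fun s q => if q.2 > s.2 then (s.1 + (q.2 - max q.1 s.2), q.2) else s)
        (total, 0)).1) 0))
  simp only
  rw [init_rows, papers_foldl_rows l (fun p hp => ⟨(hpre p hp).2.2.1, (hpre p hp).2.2.2⟩) (fun _ => [])]
  have hid : rowsOf (fun r => [] ++ rowSpans l (r : Int)) = (List.range 100).map (fun r : Nat => rowSpans l (r : Int)) := by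
    unfold rowsOf
    exact List.map_congr_left (fun r _ => by simp)
  rw [hid, List.foldl_map]
  rw [PySem.List.foldl_congr_mem _ _
      (fun (total : Int) (k : Nat) =>
        total + ((List.range 100).countP (fun b : Nat => coverA l (k : Int) (b : Int)) : Int)) 0
      (fun total k hk => by
        have hk' : k < 100 := List.mem_range.mp hk
        exact row_total l hpre (k : Int) ⟨Int.natCast_nonneg k, by exact_mod_cast hk'⟩ total)]
  rw [PySem.List.foldl_add, zero_add]
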